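-- pv_equiv track=rewrite | github.com/HuylenbroeckFlorent/adventofcode | day3/gear_ratio_2.py | extract_numbers_around_index
-- ===== SOURCE A (Python) =====
-- def extract_numbers_around_index(line, j):
--
-- 	current_number = ''
-- 	numbers = []
-- 	is_elligible = False
--
-- 	for i in range(len(line)):
--
-- 		# If at one point while parsing the number we're at indexes around j, then the number is elligible for extraction
-- 		if i>=j and i<=j+1:
-- 			is_elligible = True
--
-- 		if line[i].isdigit():
-- 			current_number += line[i]
-- 		else:
-- 			if is_elligible and current_number != '':
-- 				numbers.append(int(current_number))
-- 			current_number = ''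
-- 			is_elligible = False
--
-- 	return numbers
-- ===== SOURCE B (Python) =====
-- def extract_numbers_around_index(line, j):
--     # Look only at columns j-1, j, j+1 and expand each digit hit to its full
--     # number; unlike A's full scan this is O(length of the touched numbers).
--     n = len(line)
--     res = []
--     last_end = -1
--     for c in (j - 1, j, j + 1):
--         if 0 <= c < n and line[c].isdigit() and c > last_end:
--             s = c
--             while s > 0 and line[s - 1].isdigit():
--                 s -= 1
--             e = c
--             while e + 1 < n and line[e + 1].isdigit():
--                 e += 1
--             res.append(int(line[s:e + 1]))
--             last_end = e
--     return res
-- ===== Notes on version B (the rewrite author's own statement) =====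
-- stated objective: faster
-- what changed: Instead of scanning the whole line with an eligibility flag and an accumulating digit buffer, B inspects only columns j-1, j, j+1 and expands each digit hit to its full number's bounds, so the work is local to the touched numbers.
-- intended difference: On lines whose trailing digit run reaches the window around j, A returns the list WITHOUT that last number (its loop only emits a number when a non-digit terminator follows), while B includes it; the intended behaviour is clearly to count a number that ends at the end of the line. — e.g. on extract_numbers_around_index("12", 1): A returns [], B returns [12]
import Mathlib
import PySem

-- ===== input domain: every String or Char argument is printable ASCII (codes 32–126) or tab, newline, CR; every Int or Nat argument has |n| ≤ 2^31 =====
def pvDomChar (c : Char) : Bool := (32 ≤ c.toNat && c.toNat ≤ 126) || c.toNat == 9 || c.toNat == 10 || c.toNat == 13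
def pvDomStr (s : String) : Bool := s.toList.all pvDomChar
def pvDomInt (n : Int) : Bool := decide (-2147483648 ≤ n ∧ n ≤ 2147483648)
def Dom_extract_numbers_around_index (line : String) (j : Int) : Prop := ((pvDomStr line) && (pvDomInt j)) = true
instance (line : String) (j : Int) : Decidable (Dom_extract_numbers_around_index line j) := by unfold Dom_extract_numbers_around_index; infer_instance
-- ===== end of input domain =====

-- B examines only columns j-1..j+1 and expands each digit hit to its number's bounds
-- instead of A's whole-line scan (objective: faster); B also counts a number ending at
-- the end of the line, which A drops (see D_ below).


-- ===== PORT A =====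
-- the for-loop over range(len(line)) as structural recursion over the characters,
-- carrying the index i and the state (current_number, numbers, is_elligible)
def pvALoop (j : Int) : List Char → Int → List Char → List Int → Bool → List Int
  | [], _, _, nums, _ => nums
  | ch :: t, i, cur, nums, elig =>
    let elig := if j ≤ i ∧ i ≤ j + 1 then true else elig   -- if i>=j and i<=j+1: is_elligible = True
    if PySem.Chars.isdigit ch then                          -- line[i].isdigit() (a 1-char string)
      pvALoop j t (i + 1) (cur ++ [ch]) nums elig           -- current_number += line[i]
    else
      pvALoop j t (i + 1) []
        (if elig ∧ cur ≠ [] then nums ++ [(PySem.Int.ofChars? cur).getD 0] else nums)  -- int(current_number); cur is nonempty digits, never the default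
        false

def extract_numbers_around_index (line : String) (j : Int) : List Int :=
  pvALoop j line.toList 0 [] [] false

-- ===== PORT B =====
-- 0 <= c < n and line[c].isdigit()
def pvDigitAt (L : List Char) (c : Int) : Bool :=
  decide (0 ≤ c) && decide (c < (L.length : Int)) &&
    ((PySem.List.pyGet? L c).map PySem.Chars.isdigit).getD false

-- while s > 0 and line[s-1].isdigit(): s -= 1
def pvExpandL (L : List Char) : Nat → Nat
  | 0 => 0
  | s + 1 => if PySem.Chars.isdigit (L.getD s ' ') then pvExpandL L s else s + 1

-- while e + 1 < n and line[e+1].isdigit(): e += 1   (the fuel L.length - e only bounds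
-- the loop's iteration count; the guard and the state are the Python loop's own)
def pvExpandRGo (L : List Char) : Nat → Nat → Nat
  | 0, e => e
  | k + 1, e =>
    if e + 1 < L.length ∧ PySem.Chars.isdigit (L.getD (e + 1) ' ') then pvExpandRGo L k (e + 1) else e

def pvExpandR (L : List Char) (e : Nat) : Nat := pvExpandRGo L (L.length - e) e

-- one iteration of "for c in (j-1, j, j+1)": state (res, last_end)
def pvBStep (L : List Char) (st : List Int × Int) (c : Int) : List Int × Int :=
  if pvDigitAt L c && decide (st.2 < c) then
    let s := pvExpandL L c.toNat
    let e := pvExpandR L c.toNat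
    (st.1 ++ [(PySem.Int.ofChars? (PySem.List.slice L (some (s : Int)) (some ((e : Int) + 1)))).getD 0],
     (e : Int))
  else st

def extract_numbers_around_index_alt (line : String) (j : Int) : List Int :=
  ([j - 1, j, j + 1].foldl (pvBStep line.toList) ([], -1)).1

-- ===== PRECONDITION & SPEC =====
-- On lines whose trailing digit run reaches the window around j, A returns the list
-- WITHOUT that last number (its loop only emits a number when a non-digit terminator
-- follows), while B includes it; the intended behaviour is clearly to count a number
-- that ends at the end of the line.
def D_extract_numbers_around_index (line : String) (j : Int) : Prop :=
  0 < (line.toList.reverse.takeWhile PySem.Chars.isdigit).length ∧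
  (line.toList.length : Int) - (line.toList.reverse.takeWhile PySem.Chars.isdigit).length - 1 ≤ j ∧
  j ≤ (line.toList.length : Int)
instance (line : String) (j : Int) : Decidable (D_extract_numbers_around_index line j) := by
  unfold D_extract_numbers_around_index; infer_instance

def Spec_extract_numbers_around_index (line : String) (j : Int) (out : List Int) : Prop :=
  ¬ D_extract_numbers_around_index line j → out = extract_numbers_around_index_alt line j
instance (line : String) (j : Int) (out : List Int) : Decidable (Spec_extract_numbers_around_index line j out) := by
  unfold Spec_extract_numbers_around_index; infer_instance

def pvDiffWitness_extract_numbers_around_index : String × Int := ("12", 1)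
def pvDiffWitnessOut_extract_numbers_around_index : (List Int) × (List Int) := ([], [12])

-- ===== CLAIM (what is proved, stated in full; the proofs are below) =====
def Claim_unchanged_extract_numbers_around_index : Prop := ∀ (line : String) (j : Int), Dom_extract_numbers_around_index line j → Spec_extract_numbers_around_index line j (extract_numbers_around_index line j)
def Claim_changed_extract_numbers_around_index : Prop := Dom_extract_numbers_around_index (pvDiffWitness_extract_numbers_around_index.1) (pvDiffWitness_extract_numbers_around_index.2) ∧ D_extract_numbers_around_index (pvDiffWitness_extract_numbers_around_index.1) (pvDiffWitness_extract_numbers_around_index.2) ∧ extract_numbers_around_index (pvDiffWitness_extract_numbers_around_index.1) (pvDiffWitness_extract_numbers_around_index.2) = pvDiffWitnessOut_extract_numbers_around_index.1 ∧ extract_numbers_around_index_alt (pvDiffWitness_extract_numbers_around_index.1) (pvDiffWitness_extract_numbers_around_index.2) = pvDiffWitnessOut_extract_numbers_around_index.2 ∧ pvDiffWitnessOut_extract_numbers_around_index.1 ≠ pvDiffWitnessOut_extract_numbers_around_index.2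
def Claim_exact_extract_numbers_around_index : Prop := ∀ (line : String) (j : Int), Dom_extract_numbers_around_index line j → D_extract_numbers_around_index line j → extract_numbers_around_index line j ≠ extract_numbers_around_index_alt line j

-- ===== LEMMAS AND PROOFS =====

-- value of a digit run
def pvVal (d : List Char) : Int := (PySem.Int.ofChars? d).getD 0

-- reference function: the digit runs of L whose neighbourhood [s-1, e+1] contains j,
-- in left-to-right order; keep = false drops a run reaching the end of the line (A's
-- behaviour), keep = true keeps it (B's behaviour)
def pvRef (keep : Bool) (L : List Char) (j : Int) : List Int :=
  let d := L.takeWhile PySem.Chars.isdigit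
  let rest := L.dropWhile PySem.Chars.isdigit
  if h : rest = [] then
    if keep = true ∧ d ≠ [] ∧ -1 ≤ j ∧ j ≤ (d.length : Int) then [pvVal d] else []
  else
    (if d ≠ [] ∧ -1 ≤ j ∧ j ≤ (d.length : Int) then [pvVal d] else []) ++
      pvRef keep rest.tail (j - d.length - 1)
  termination_by L.length
  decreasing_by
    have h1 := List.length_dropWhile_le PySem.Chars.isdigit L
    have h2 : 0 < (L.dropWhile PySem.Chars.isdigit).length := List.length_pos_of_ne_nil h
    simp only [List.length_tail]
    omega

-- scanning a block of digits only grows current_number and accumulates eligibility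
theorem pvALoop_digits (j : Int) (d : List Char) (hd : ∀ c ∈ d, PySem.Chars.isdigit c = true) :
    ∀ (rest : List Char) (i : Int) (cur : List Char) (nums : List Int) (elig : Bool),
    pvALoop j (d ++ rest) i cur nums elig =
    pvALoop j rest (i + d.length) (cur ++ d) nums
      (elig || decide (i - 1 ≤ j ∧ j ≤ i + d.length - 1 ∧ 0 < d.length)) := by
  induction d with
  | nil =>
    intro rest i cur nums elig
    simp
  | cons c d ih =>
    intro rest i cur nums elig
    have hc : PySem.Chars.isdigit c = true := hd c (List.mem_cons_self)
    simp only [List.cons_append, pvALoop, hc, if_true]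
    rw [ih (fun x hx => hd x (List.mem_cons_of_mem c hx))]
    have harr : cur ++ [c] ++ d = cur ++ c :: d := by simp
    rw [harr]
    congr 1
    · simp only [List.length_cons]; push_cast; omega
    · -- boolean bookkeeping for the eligibility flag
      have hite : (if j ≤ i ∧ i ≤ j + 1 then true else elig) = (decide (j ≤ i ∧ i ≤ j + 1) || elig) := by
        by_cases hP : j ≤ i ∧ i ≤ j + 1 <;> simp [hP]
      rw [hite]
      cases elig
      · simp only [Bool.false_or, Bool.or_false, ← Bool.decide_or]
        rw [decide_eq_decide]
        simp only [List.length_cons]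
        push_cast
        omega
      · simp
theorem pvALoop_run : ∀ (n : Nat) (L : List Char), L.length = n → ∀ (j i : Int) (nums : List Int),
    pvALoop j L i [] nums false = nums ++ pvRef false L (j - i) := by
  intro n
  induction n using Nat.strong_induction_on with
  | _ n IH =>
    intro L hL j i nums
    have hsplit := List.takeWhile_append_dropWhile (p := PySem.Chars.isdigit) (l := L)
    have hdig : ∀ c ∈ L.takeWhile PySem.Chars.isdigit, PySem.Chars.isdigit c = true :=
      fun c hc => List.mem_takeWhile_imp hc
    have h1 : pvALoop j L i [] nums false =
        pvALoop j (L.dropWhile PySem.Chars.isdigit) (i + (L.takeWhile PySem.Chars.isdigit).length)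
          (L.takeWhile PySem.Chars.isdigit) nums
          (decide (i - 1 ≤ j ∧ j ≤ i + (L.takeWhile PySem.Chars.isdigit).length - 1 ∧
                   0 < (L.takeWhile PySem.Chars.isdigit).length)) := by
      conv_lhs => rw [← hsplit]
      rw [pvALoop_digits j _ hdig]
      simp
    rw [h1, pvRef]
    set d := L.takeWhile PySem.Chars.isdigit with hd
    set m := d.length with hm
    rcases hrest : L.dropWhile PySem.Chars.isdigit with _ | ⟨c0, t⟩
    · simp only [hrest, pvALoop]
      simp
    · have hc0 : PySem.Chars.isdigit c0 = false := by
        have hne : L.dropWhile PySem.Chars.isdigit ≠ [] := by rw [hrest]; simp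
        have := List.head_dropWhile_not PySem.Chars.isdigit hne
        simpa [hrest] using this
      have hlen : L.length = m + 1 + t.length := by
        have := congrArg List.length hsplit
        simp only [List.length_append, hrest, List.length_cons] at this
        omega
      simp only [hrest, pvALoop, hc0, Bool.false_eq_true, if_false]
      have ht : t.length < n := by omega
      rw [IH t.length ht t rfl j (i + ↑m + 1) _]
      simp only [dif_neg (List.cons_ne_nil c0 t), List.tail_cons]
      have hj' : j - (i + ↑m + 1) = j - i - ↑m - 1 := by omega
      rw [hj']
      rw [← List.append_assoc]
      congr 1
      -- the emitted number agrees with the reference's first if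
      have hb : (if j ≤ i + (m : Int) ∧ i + (m : Int) ≤ j + 1 then true
            else decide (i - 1 ≤ j ∧ j ≤ i + (m : Int) - 1 ∧ 0 < m)) =
          decide ((j ≤ i + (m : Int) ∧ i + (m : Int) ≤ j + 1) ∨
            (i - 1 ≤ j ∧ j ≤ i + (m : Int) - 1 ∧ 0 < m)) := by
        by_cases hP : j ≤ i + (m : Int) ∧ i + (m : Int) ≤ j + 1 <;> simp [hP]
      rw [hb]
      split_ifs with hA hB hB
      · simp [pvVal]
      · exfalso
        apply hB
        have hor := of_decide_eq_true hA.1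
        have hmpos : 0 < m := by
          have := List.length_pos_of_ne_nil hA.2
          omega
        exact ⟨hA.2, by omega, by omega⟩
      · exfalso
        apply hA
        have hmpos : 0 < m := by
          have := List.length_pos_of_ne_nil hB.1
          omega
        exact ⟨decide_eq_true (by omega), hB.1⟩
      · simp
theorem pvA_eq_ref : ∀ (L : List Char) (j : Int), pvALoop j L 0 [] [] false = pvRef false L j := by
  intro L j
  have := pvALoop_run L.length L rfl j 0 []
  simpa using this

theorem pvTakeWhile_append_false {α : Type} (p : α → Bool) (y : α) (hy : p y = false) :
    ∀ (xs ys : List α), (xs ++ y :: ys).takeWhile p = xs.takeWhile p := by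
  intro xs ys
  induction xs with
  | nil => simp [List.takeWhile_cons, hy]
  | cons x xs ih =>
    simp only [List.cons_append, List.takeWhile_cons]
    cases hx : p x <;> simp [ih]

-- ---- small facts about pvDigitAt ----
theorem pvDigitAt_neg (L : List Char) (c : Int) (h : c < 0) : pvDigitAt L c = false := by
  unfold pvDigitAt
  simp [show ¬(0 ≤ c) by omega]

theorem pvDigitAt_ge (L : List Char) (c : Int) (h : (L.length : Int) ≤ c) : pvDigitAt L c = false := by
  unfold pvDigitAt
  simp [show ¬(c < (L.length : Int)) by omega]

theorem pvDigitAt_eq (L : List Char) (c : Int) (h0 : 0 ≤ c) (h1 : c < (L.length : Int)) :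
    pvDigitAt L c = PySem.Chars.isdigit (L.getD c.toNat ' ') := by
  unfold pvDigitAt
  have hc : ((c.toNat : Nat) : Int) = c := Int.toNat_of_nonneg h0
  have hlt : c.toNat < L.length := by omega
  rw [← hc, PySem.List.pyGet?_natCast, List.getElem?_eq_getElem hlt]
  simp [List.getD_eq_getElem?_getD, List.getElem?_eq_getElem hlt, h0, h1, hc]

theorem pvDigitAt_true_bounds (L : List Char) (c : Int) (h : pvDigitAt L c = true) :
    0 ≤ c ∧ c < (L.length : Int) := by
  unfold pvDigitAt at h
  simp only [Bool.and_eq_true, decide_eq_true_eq] at h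
  exact ⟨h.1.1, h.1.2⟩

-- ---- facts about the leading digit run ----
theorem pvRun_digit (L : List Char) (k : Nat)
    (hk : k < (L.takeWhile PySem.Chars.isdigit).length) :
    PySem.Chars.isdigit (L.getD k ' ') = true := by
  set d := L.takeWhile PySem.Chars.isdigit with hd
  have hpre : L.take d.length = d := (List.prefix_iff_eq_take.mp (List.takeWhile_prefix _)).symm
  have h2 : L.getD k ' ' = d.getD k ' ' := by
    rw [List.getD_eq_getElem?_getD, List.getD_eq_getElem?_getD, ← hpre,
      List.getElem?_take_of_lt hk]
  have h3 : d.getD k ' ' = d[k] := by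
    rw [List.getD_eq_getElem?_getD, List.getElem?_eq_getElem hk]
    rfl
  rw [h2, h3]
  exact List.mem_takeWhile_imp (List.getElem_mem hk)

theorem pvRun_le (L : List Char) : (L.takeWhile PySem.Chars.isdigit).length ≤ L.length :=
  List.IsPrefix.length_le (List.takeWhile_prefix _)

theorem pvRun_stop (L : List Char) :
    (L.takeWhile PySem.Chars.isdigit).length = L.length ∨
    ((L.takeWhile PySem.Chars.isdigit).length < L.length ∧
      PySem.Chars.isdigit (L.getD (L.takeWhile PySem.Chars.isdigit).length ' ') = false) := by
  have hsplit := List.takeWhile_append_dropWhile (p := PySem.Chars.isdigit) (l := L)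
  rcases hrest : L.dropWhile PySem.Chars.isdigit with _ | ⟨c0, t⟩
  · left
    rw [hrest] at hsplit
    simpa using congrArg List.length hsplit
  · right
    have hc0 : PySem.Chars.isdigit c0 = false := by
      have hne : L.dropWhile PySem.Chars.isdigit ≠ [] := by rw [hrest]; simp
      have := List.head_dropWhile_not PySem.Chars.isdigit hne
      simpa [hrest] using this
    rw [hrest] at hsplit
    have base : ((L.takeWhile PySem.Chars.isdigit) ++ c0 :: t).getD
        (L.takeWhile PySem.Chars.isdigit).length ' ' = c0 := by
      rw [List.getD_append_right _ _ _ _ (le_refl _)]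
      simp
    rw [hsplit] at base
    refine ⟨?_, by rw [base, hc0]⟩
    have := congrArg List.length hsplit
    simp only [List.length_append, List.length_cons] at this
    omega

-- ---- the expansion loops on the leading run ----
theorem pvExpandL_run (L : List Char) :
    ∀ c, c ≤ (L.takeWhile PySem.Chars.isdigit).length → pvExpandL L c = 0 := by
  intro c
  induction c with
  | zero => intro _; rfl
  | succ s ih =>
    intro hc
    have hs : PySem.Chars.isdigit (L.getD s ' ') = true := pvRun_digit L s (by omega)
    simp only [pvExpandL, hs, if_true]
    exact ih (by omega)

theorem pvExpandRGo_run (L : List Char) :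
    ∀ (f e : Nat), e < (L.takeWhile PySem.Chars.isdigit).length →
      (L.takeWhile PySem.Chars.isdigit).length ≤ f + e + 1 →
      pvExpandRGo L f e = (L.takeWhile PySem.Chars.isdigit).length - 1 := by
  intro f
  induction f with
  | zero =>
    intro e h1 h2
    simp only [pvExpandRGo]
    omega
  | succ f ih =>
    intro e h1 h2
    by_cases he : e + 1 < (L.takeWhile PySem.Chars.isdigit).length
    · have hb : e + 1 < L.length := by
        have := pvRun_le L
        omega
      have hd : PySem.Chars.isdigit (L.getD (e + 1) ' ') = true := pvRun_digit L (e + 1) he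
      simp only [pvExpandRGo, hb, hd, and_self, if_true]
      exact ih (e + 1) he (by omega)
    · have heq : e + 1 = (L.takeWhile PySem.Chars.isdigit).length := by omega
      rcases pvRun_stop L with hs | hs
      · simp only [pvExpandRGo]
        rw [if_neg]
        · omega
        · rintro ⟨hb, _⟩
          omega
      · simp only [pvExpandRGo]
        rw [if_neg]
        · omega
        · rintro ⟨_, hdg⟩
          rw [heq, hs.2] at hdg
          simp at hdg

theorem pvExpandR_run (L : List Char) (e : Nat)
    (he : e < (L.takeWhile PySem.Chars.isdigit).length) :
    pvExpandR L e = (L.takeWhile PySem.Chars.isdigit).length - 1 := by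
  unfold pvExpandR
  have := pvRun_le L
  exact pvExpandRGo_run L (L.length - e) e he (by omega)

-- ---- shifting over a non-digit separator ----
theorem pvGetD_shift (d t : List Char) (c0 : Char) (k : Nat) :
    (d ++ c0 :: t).getD (d.length + 1 + k) ' ' = t.getD k ' ' := by
  rw [List.getD_append_right _ _ _ _ (by omega)]
  have : d.length + 1 + k - d.length = k + 1 := by omega
  rw [this]
  simp

theorem pvExpandL_shift (d t : List Char) (c0 : Char)
    (hc0 : PySem.Chars.isdigit c0 = false) :
    ∀ k, pvExpandL (d ++ c0 :: t) (d.length + 1 + k) = d.length + 1 + pvExpandL t k := by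
  intro k
  induction k with
  | zero =>
    have hm : (d ++ c0 :: t).getD d.length ' ' = c0 := by
      rw [List.getD_append_right _ _ _ _ (le_refl _)]
      simp
    show pvExpandL (d ++ c0 :: t) (d.length + 1) = _
    simp only [pvExpandL, hm, hc0, Bool.false_eq_true, if_false]
  | succ k ih =>
    show pvExpandL (d ++ c0 :: t) ((d.length + 1 + k) + 1) = _
    simp only [pvExpandL, pvGetD_shift d t c0 k]
    cases hdg : PySem.Chars.isdigit (t.getD k ' ')
    · simp only [Bool.false_eq_true, if_false]
      omega
    · simp only [if_true]
      exact ih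

theorem pvExpandRGo_shift (d t : List Char) (c0 : Char) :
    ∀ (f k : Nat), pvExpandRGo (d ++ c0 :: t) f (d.length + 1 + k) = d.length + 1 + pvExpandRGo t f k := by
  intro f
  induction f with
  | zero => intro k; rfl
  | succ f ih =>
    intro k
    have hlen : (d ++ c0 :: t).length = d.length + 1 + t.length := by simp; omega
    have hguard : (d.length + 1 + k + 1 < (d ++ c0 :: t).length) ↔ (k + 1 < t.length) := by
      rw [hlen]; omega
    have hget : (d ++ c0 :: t).getD (d.length + 1 + k + 1) ' ' = t.getD (k + 1) ' ' := by
      have : d.length + 1 + k + 1 = d.length + 1 + (k + 1) := by omega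
      rw [this, pvGetD_shift]
    simp only [pvExpandRGo, hguard, hget]
    by_cases hc : k + 1 < t.length ∧ PySem.Chars.isdigit (t.getD (k + 1) ' ') = true
    · rw [if_pos hc, if_pos hc]
      have : d.length + 1 + k + 1 = d.length + 1 + (k + 1) := by omega
      rw [this, ih]
    · rw [if_neg hc, if_neg hc]

theorem pvExpandR_shift (d t : List Char) (c0 : Char) (k : Nat) :
    pvExpandR (d ++ c0 :: t) (d.length + 1 + k) = d.length + 1 + pvExpandR t k := by
  unfold pvExpandR
  have hlen : (d ++ c0 :: t).length = d.length + 1 + t.length := by simp; omega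
  have : (d ++ c0 :: t).length - (d.length + 1 + k) = t.length - k := by omega
  rw [this, pvExpandRGo_shift]

-- ---- slice values ----
theorem pvSlice_prefix (L : List Char) (h : 0 < (L.takeWhile PySem.Chars.isdigit).length) :
    PySem.List.slice L (some ((0 : Nat) : Int))
      (some ((((L.takeWhile PySem.Chars.isdigit).length - 1 : Nat) : Int) + 1)) =
    L.takeWhile PySem.Chars.isdigit := by
  have hcast : (((L.takeWhile PySem.Chars.isdigit).length - 1 : Nat) : Int) + 1 =
      (((L.takeWhile PySem.Chars.isdigit).length : Nat) : Int) := by omega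
  rw [hcast, PySem.List.slice_natCast]
  simpa using (List.prefix_iff_eq_take.mp (List.takeWhile_prefix _)).symm

theorem pvSlice_shift (d t : List Char) (c0 : Char) (s e : Nat) :
    PySem.List.slice (d ++ c0 :: t) (some ((d.length + 1 + s : Nat) : Int))
      (some (((d.length + 1 + e : Nat) : Int) + 1)) =
    PySem.List.slice t (some ((s : Nat) : Int)) (some (((e : Nat) : Int) + 1)) := by
  have h1 : ((d.length + 1 + e : Nat) : Int) + 1 = ((d.length + 1 + e + 1 : Nat) : Int) := by omega
  have h2 : ((e : Nat) : Int) + 1 = ((e + 1 : Nat) : Int) := by omega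
  rw [h1, h2, PySem.List.slice_natCast, PySem.List.slice_natCast]
  have hd : (d ++ c0 :: t).drop (d.length + 1 + s) = t.drop s := by
    have hst : d ++ c0 :: t = (d ++ [c0]) ++ t := by simp
    have hl : d.length + 1 + s = (d ++ [c0]).length + s := by simp
    rw [hst, hl, List.drop_length_add_append]
  rw [hd]
  congr 1
  omega

-- ---- step lemmas ----
theorem pvBStep_miss_digit (L : List Char) (st : List Int × Int) (c : Int)
    (h : pvDigitAt L c = false) : pvBStep L st c = st := by
  unfold pvBStep
  rw [h]
  simp

theorem pvBStep_miss_last (L : List Char) (st : List Int × Int) (c : Int)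
    (h : ¬ st.2 < c) : pvBStep L st c = st := by
  unfold pvBStep
  simp [h]

theorem pvBStep_hit_run0 (L : List Char) (res : List Int) (le : Int) (c : Int)
    (h0 : 0 ≤ c) (h1 : c < ((L.takeWhile PySem.Chars.isdigit).length : Int)) (hle : le < c) :
    pvBStep L (res, le) c =
      (res ++ [pvVal (L.takeWhile PySem.Chars.isdigit)],
       (((L.takeWhile PySem.Chars.isdigit).length - 1 : Nat) : Int)) := by
  have hlen := pvRun_le L
  have hda : pvDigitAt L c = true := by
    rw [pvDigitAt_eq L c h0 (by push_cast; omega)]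
    exact pvRun_digit L c.toNat (by omega)
  unfold pvBStep
  rw [hda]
  simp only [Bool.true_and, decide_eq_true_eq]
  rw [if_pos hle]
  have hL : pvExpandL L c.toNat = 0 := pvExpandL_run L c.toNat (by omega)
  have hR : pvExpandR L c.toNat = (L.takeWhile PySem.Chars.isdigit).length - 1 :=
    pvExpandR_run L c.toNat (by omega)
  rw [hL, hR, pvSlice_prefix L (by omega)]
  rfl

theorem pvBStep_skip_run0 (L : List Char) (res : List Int) (c : Int)
    (hdl : 0 < (L.takeWhile PySem.Chars.isdigit).length)
    (hc : c ≤ ((L.takeWhile PySem.Chars.isdigit).length : Int)) :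
    pvBStep L (res, (((L.takeWhile PySem.Chars.isdigit).length - 1 : Nat) : Int)) c =
      (res, (((L.takeWhile PySem.Chars.isdigit).length - 1 : Nat) : Int)) := by
  by_cases hcl : c ≤ ((L.takeWhile PySem.Chars.isdigit).length : Int) - 1
  · exact pvBStep_miss_last L _ c (by simp; omega)
  · have hceq : c = ((L.takeWhile PySem.Chars.isdigit).length : Int) := by omega
    rcases pvRun_stop L with hs | hs
    · exact pvBStep_miss_digit L _ c (pvDigitAt_ge L c (by omega))
    · refine pvBStep_miss_digit L _ c ?_
      rw [pvDigitAt_eq L c (by omega) (by omega)]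
      have : c.toNat = (L.takeWhile PySem.Chars.isdigit).length := by omega
      rw [this, hs.2]

-- ---- the whole step shifts over a non-digit separator ----
theorem pvBStep_shift (d t : List Char) (c0 : Char)
    (hc0 : PySem.Chars.isdigit c0 = false)
    (st : List Int × Int) (hst : -1 ≤ st.2) (c : Int) (hc : (d.length : Int) ≤ c) :
    pvBStep (d ++ c0 :: t) (st.1, if st.2 = -1 then -1 else st.2 + d.length + 1) c =
      ((pvBStep t st (c - d.length - 1)).1,
       if (pvBStep t st (c - d.length - 1)).2 = -1 then -1
       else (pvBStep t st (c - d.length - 1)).2 + d.length + 1) := by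
  have hlen : (d ++ c0 :: t).length = d.length + 1 + t.length := by simp; omega
  by_cases hcm : c = (d.length : Int)
  · have h1 : pvDigitAt (d ++ c0 :: t) c = false := by
      rw [pvDigitAt_eq _ c (by omega) (by rw [hlen]; push_cast; omega)]
      have : c.toNat = d.length := by omega
      rw [this]
      have hm : (d ++ c0 :: t).getD d.length ' ' = c0 := by
        rw [List.getD_append_right _ _ _ _ (le_refl _)]
        simp
      rw [hm, hc0]
    have h2 : pvDigitAt t (c - d.length - 1) = false := pvDigitAt_neg t _ (by omega)
    rw [pvBStep_miss_digit _ _ _ h1, pvBStep_miss_digit _ _ _ h2]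
  · have hc1 : (d.length : Int) + 1 ≤ c := by omega
    have hcnat : c.toNat = d.length + 1 + (c - d.length - 1).toNat := by omega
    have hDA : pvDigitAt (d ++ c0 :: t) c = pvDigitAt t (c - d.length - 1) := by
      by_cases hin : c < ((d ++ c0 :: t).length : Int)
      · rw [pvDigitAt_eq _ c (by omega) hin,
          pvDigitAt_eq t (c - d.length - 1) (by omega) (by rw [hlen] at hin; push_cast at hin ⊢; omega)]
        rw [hcnat, pvGetD_shift]
      · rw [pvDigitAt_ge _ c (by omega), pvDigitAt_ge t _ (by rw [hlen] at hin; push_cast at hin ⊢; omega)]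
    have hG : ((if st.2 = -1 then -1 else st.2 + (d.length : Int) + 1) < c) ↔ (st.2 < c - d.length - 1) := by
      split_ifs with h <;> omega
    cases hda : pvDigitAt t (c - d.length - 1)
    · rw [pvBStep_miss_digit _ _ _ (hDA.trans hda), pvBStep_miss_digit _ _ _ hda]
    · by_cases hg : st.2 < c - d.length - 1
      · have hbounds := pvDigitAt_true_bounds t _ hda
        unfold pvBStep
        rw [hDA, hda]
        simp only [Bool.true_and, decide_eq_true_eq]
        rw [if_pos (hG.mpr hg), if_pos hg]
        rw [hcnat, pvExpandL_shift d t c0 hc0, pvExpandR_shift d t c0, pvSlice_shift]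
        have hne : ((pvExpandR t (c - d.length - 1).toNat : Nat) : Int) ≠ -1 := by omega
        rw [if_neg hne]
        simp only [Prod.mk.injEq]
        exact ⟨trivial, by push_cast; ring⟩
      · rw [pvBStep_miss_last _ _ _ (fun h => hg (hG.mp h)), pvBStep_miss_last _ _ _ hg]

theorem pvBStep_lastE_mono (L : List Char) (st : List Int × Int) (c : Int)
    (h : -1 ≤ st.2) : -1 ≤ (pvBStep L st c).2 := by
  unfold pvBStep
  split
  · simp
  · exact h

-- ---- degenerate windows of the reference ----
theorem pvRef_low : ∀ (n : Nat) (L : List Char), L.length = n → ∀ (keep : Bool) (j : Int),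
    j < -1 → pvRef keep L j = [] := by
  intro n
  induction n using Nat.strong_induction_on with
  | _ n IH =>
    intro L hL keep j hj
    rw [pvRef]
    rcases hrest : L.dropWhile PySem.Chars.isdigit with _ | ⟨c0, t⟩
    · simp only [hrest, dif_pos]
      rw [if_neg (by rintro ⟨_, _, h, _⟩; omega)]
    · simp only [hrest, List.tail_cons]
      rw [dif_neg (List.cons_ne_nil c0 t)]
      rw [if_neg (by rintro ⟨_, h, _⟩; omega)]
      have hlen : L.length = (L.takeWhile PySem.Chars.isdigit).length + 1 + t.length := by
        have := congrArg List.length (List.takeWhile_append_dropWhile (p := PySem.Chars.isdigit) (l := L))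
        simp only [List.length_append, hrest, List.length_cons] at this
        omega
      rw [IH t.length (by omega) t rfl keep _ (by omega)]
      simp

theorem pvRef_high : ∀ (n : Nat) (L : List Char), L.length = n → ∀ (keep : Bool) (j : Int),
    (L.length : Int) < j → pvRef keep L j = [] := by
  intro n
  induction n using Nat.strong_induction_on with
  | _ n IH =>
    intro L hL keep j hj
    have hdl := pvRun_le L
    rw [pvRef]
    rcases hrest : L.dropWhile PySem.Chars.isdigit with _ | ⟨c0, t⟩
    · simp only [hrest, dif_pos]
      rw [if_neg (by rintro ⟨_, _, _, h⟩; omega)]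
    · simp only [hrest, List.tail_cons]
      rw [dif_neg (List.cons_ne_nil c0 t)]
      rw [if_neg (by rintro ⟨_, _, h⟩; omega)]
      have hlen : L.length = (L.takeWhile PySem.Chars.isdigit).length + 1 + t.length := by
        have := congrArg List.length (List.takeWhile_append_dropWhile (p := PySem.Chars.isdigit) (l := L))
        simp only [List.length_append, hrest, List.length_cons] at this
        omega
      rw [IH t.length (by omega) t rfl keep _ (by omega)]
      simp

theorem pvRef_neg_one (t : List Char) :
    pvRef true t (-1) =
      if t.takeWhile PySem.Chars.isdigit = [] then []
      else [pvVal (t.takeWhile PySem.Chars.isdigit)] := by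
  rw [pvRef]
  rcases hrest : t.dropWhile PySem.Chars.isdigit with _ | ⟨c0, t'⟩
  · simp only [hrest, dif_pos]
    by_cases hd : t.takeWhile PySem.Chars.isdigit = []
    · rw [if_neg (by rintro ⟨_, h, _⟩; exact h hd), if_pos hd]
    · rw [if_pos ⟨by trivial, hd, by omega, by omega⟩, if_neg hd]
  · simp only [hrest, List.tail_cons]
    rw [dif_neg (List.cons_ne_nil c0 t')]
    rw [pvRef_low t'.length t' rfl true _ (by omega), List.append_nil]
    by_cases hd : t.takeWhile PySem.Chars.isdigit = []
    · rw [if_neg (by rintro ⟨h, _⟩; exact h hd), if_pos hd]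
    · rw [if_pos ⟨hd, by omega, by omega⟩, if_neg hd]

-- the window only touches the leading digit run: the fold extracts exactly that run
theorem pvB_fold_prefix (L : List Char) (j : Int)
    (hdl0 : 0 < (L.takeWhile PySem.Chars.isdigit).length)
    (hj1 : -1 ≤ j) (hj2 : j ≤ ((L.takeWhile PySem.Chars.isdigit).length : Int))
    (hextra : ((L.takeWhile PySem.Chars.isdigit).length : Int) < j + 1 → pvDigitAt L (j + 1) = false) :
    pvBStep L (pvBStep L (pvBStep L ([], -1) (j - 1)) j) (j + 1) =
      ([pvVal (L.takeWhile PySem.Chars.isdigit)],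
       (((L.takeWhile PySem.Chars.isdigit).length - 1 : Nat) : Int)) := by
  by_cases h1 : j = -1
  · subst h1
    rw [pvBStep_miss_digit L _ (-1 - 1) (pvDigitAt_neg L (-1 - 1) (by omega)),
        pvBStep_miss_digit L _ (-1) (pvDigitAt_neg L (-1) (by omega)),
        pvBStep_hit_run0 L [] (-1) (-1 + 1) (by omega) (by omega) (by omega)]
    simp
  by_cases h2 : j = 0
  · subst h2
    rw [pvBStep_miss_digit L _ (0 - 1) (pvDigitAt_neg L (0 - 1) (by omega)),
        pvBStep_hit_run0 L [] (-1) 0 (by omega) (by omega) (by omega)]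
    simp only [List.nil_append]
    rw [pvBStep_skip_run0 L _ (0 + 1) hdl0 (by omega)]
  · have hj3 : 1 ≤ j := by omega
    rw [pvBStep_hit_run0 L [] (-1) (j - 1) (by omega) (by omega) (by omega)]
    simp only [List.nil_append]
    rw [pvBStep_skip_run0 L _ j hdl0 (by omega)]
    by_cases h4 : j + 1 ≤ ((L.takeWhile PySem.Chars.isdigit).length : Int)
    · rw [pvBStep_skip_run0 L _ (j + 1) hdl0 h4]
    · rw [pvBStep_miss_digit L _ (j + 1) (hextra (by omega))]

theorem pvB_run : ∀ (n : Nat) (L : List Char), L.length = n → ∀ (j : Int),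
    (([j - 1, j, j + 1].foldl (pvBStep L) ([], -1)).1) = pvRef true L j := by
  intro n
  induction n using Nat.strong_induction_on with
  | _ n IH =>
  intro L hL j
  simp only [List.foldl_cons, List.foldl_nil]
  by_cases hlow : j < -1
  · rw [pvBStep_miss_digit L _ (j + 1) (pvDigitAt_neg L (j + 1) (by omega)),
        pvBStep_miss_digit L _ j (pvDigitAt_neg L j (by omega)),
        pvBStep_miss_digit L _ (j - 1) (pvDigitAt_neg L (j - 1) (by omega)),
        pvRef_low L.length L rfl true j hlow]
  by_cases hhigh : (L.length : Int) < j
  · rw [pvBStep_miss_digit L _ (j + 1) (pvDigitAt_ge L (j + 1) (by omega)),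
        pvBStep_miss_digit L _ j (pvDigitAt_ge L j (by omega)),
        pvBStep_miss_digit L _ (j - 1) (pvDigitAt_ge L (j - 1) (by omega)),
        pvRef_high L.length L rfl true j hhigh]
  push_neg at hlow hhigh
  have hsplit := List.takeWhile_append_dropWhile (p := PySem.Chars.isdigit) (l := L)
  rcases hrest : L.dropWhile PySem.Chars.isdigit with _ | ⟨c0, t⟩
  · -- trailing case: L is all digits
    have hdL : L.takeWhile PySem.Chars.isdigit = L := by
      conv_rhs => rw [← hsplit]
      rw [hrest]
      simp
    by_cases hnil : L = []
    · subst hnil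
      have hda : ∀ c : Int, pvDigitAt ([] : List Char) c = false := by
        intro c
        by_cases h : c < 0
        · exact pvDigitAt_neg _ _ h
        · exact pvDigitAt_ge _ _ (by simp; omega)
      rw [pvBStep_miss_digit _ _ (j + 1) (hda _), pvBStep_miss_digit _ _ j (hda _),
          pvBStep_miss_digit _ _ (j - 1) (hda _), pvRef]
      simp
    · have hdl0 : 0 < (L.takeWhile PySem.Chars.isdigit).length := by
        rw [hdL]
        exact List.length_pos_of_ne_nil hnil
      have hfold := pvB_fold_prefix L j hdl0 hlow (by rw [hdL]; exact hhigh)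
        (fun h => pvDigitAt_ge L _ (by rw [hdL] at h; omega))
      rw [hfold, pvRef]
      simp only [hrest, dif_pos]
      rw [if_pos ⟨by trivial, by rw [hdL]; exact hnil, hlow, by rw [hdL]; exact hhigh⟩]
  · -- L = d ++ c0 :: t with c0 not a digit
    set d := L.takeWhile PySem.Chars.isdigit with hd
    have hc0 : PySem.Chars.isdigit c0 = false := by
      have hne : L.dropWhile PySem.Chars.isdigit ≠ [] := by rw [hrest]; simp
      have := List.head_dropWhile_not PySem.Chars.isdigit hne
      simpa [hrest] using this
    rw [hrest] at hsplit
    have hLdc : L = d ++ c0 :: t := hsplit.symm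
    have hdigd : ∀ x ∈ d, PySem.Chars.isdigit x = true := fun x hx => List.mem_takeWhile_imp hx
    have htake : (d ++ c0 :: t).takeWhile PySem.Chars.isdigit = d := by
      rw [pvTakeWhile_append_false _ c0 hc0]
      exact List.takeWhile_eq_self_iff.mpr hdigd
    have hdrop : (d ++ c0 :: t).dropWhile PySem.Chars.isdigit = c0 :: t := by
      have h := List.takeWhile_append_dropWhile (p := PySem.Chars.isdigit) (l := d ++ c0 :: t)
      rw [htake] at h
      exact List.append_cancel_left h
    have hlen : L.length = d.length + 1 + t.length := by
      rw [hLdc]; simp; omega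
    have htn : t.length < n := by omega
    have hstepR : ∀ j'' : Int, pvRef true (d ++ c0 :: t) j'' =
        (if d ≠ [] ∧ -1 ≤ j'' ∧ j'' ≤ (d.length : Int) then [pvVal d] else []) ++
          pvRef true t (j'' - d.length - 1) := by
      intro j''
      rw [pvRef]
      simp only [htake, hdrop, List.tail_cons]
      rw [dif_neg (List.cons_ne_nil c0 t)]
    have hda0 : pvDigitAt (d ++ c0 :: t) (d.length : Int) = false := by
      rw [pvDigitAt_eq _ _ (by omega) (by simp only [List.length_append, List.length_cons]; push_cast; omega)]
      have h1 : ((d.length : Int)).toNat = d.length := by omega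
      rw [h1]
      have hm : (d ++ c0 :: t).getD d.length ' ' = c0 := by
        rw [List.getD_append_right _ _ _ _ (le_refl _)]
        simp
      rw [hm, hc0]
    rw [hLdc]
    rw [hLdc] at hhigh
    rw [hLdc] at hlen
    by_cases hcj : j < (d.length : Int)
    · rcases Nat.eq_zero_or_pos d.length with hm0 | hmpos
      · -- d = [], so j = -1 and nothing is found
        have hdnil : d = [] := List.eq_nil_of_length_eq_zero hm0
        have hjm : j = -1 := by omega
        subst hjm
        rw [pvBStep_miss_digit _ _ (-1 - 1) (pvDigitAt_neg _ (-1 - 1) (by omega)),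
            pvBStep_miss_digit _ _ (-1) (pvDigitAt_neg _ (-1) (by omega)),
            pvBStep_miss_digit _ _ (-1 + 1) (by
              have h := hda0
              rw [hm0] at h
              simpa using h)]
        rw [hstepR, if_neg (by rintro ⟨h, _⟩; exact h hdnil)]
        rw [pvRef_low t.length t rfl true _ (by omega)]
        simp
      · have hfold := pvB_fold_prefix (d ++ c0 :: t) j (by rw [htake]; exact hmpos)
          hlow (by rw [htake]; omega) (fun h => absurd h (by rw [htake]; omega))
        rw [hfold, hstepR]
        rw [if_pos ⟨List.ne_nil_of_length_pos hmpos, hlow, by omega⟩]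
        rw [pvRef_low t.length t rfl true _ (by omega)]
        simp [htake]
    · by_cases hdj : j = (d.length : Int)
      · -- the window straddles the separator
        subst hdj
        have hcol3 : ∀ (res : List Int) (le : Int), le < (d.length : Int) + 1 →
            (pvBStep (d ++ c0 :: t) (res, le) ((d.length : Int) + 1)).1 =
              res ++ pvRef true t (-1) := by
          intro res le hle
          rcases ht : t with _ | ⟨t0, t'⟩
          · rw [pvBStep_miss_digit _ _ _ (pvDigitAt_ge _ ((d.length : Int) + 1) (by
              simp only [List.length_append, List.length_cons, List.length_nil]
              push_cast
              omega))]
            rw [pvRef_neg_one]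
            simp
          · rw [← ht]
            have htne : t ≠ [] := by rw [ht]; simp
            have hget : (d ++ c0 :: t).getD (d.length + 1) ' ' = t.getD 0 ' ' := by
              have := pvGetD_shift d t c0 0
              simpa using this
            have hda : pvDigitAt (d ++ c0 :: t) ((d.length : Int) + 1) =
                PySem.Chars.isdigit (t.getD 0 ' ') := by
              rw [pvDigitAt_eq _ _ (by omega)
                (by simp only [List.length_append, List.length_cons]; push_cast
                    have := List.length_pos_of_ne_nil htne; omega)]
              have h2 : ((d.length : Int) + 1).toNat = d.length + 1 := by omega
              rw [h2, hget]
            cases hdt0 : PySem.Chars.isdigit (t.getD 0 ' ')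
            · rw [pvBStep_miss_digit _ _ _ (hda.trans hdt0)]
              rw [pvRef_neg_one]
              rw [if_pos]
              · simp
              · rw [ht]
                simp only [List.takeWhile_cons]
                rw [ht] at hdt0
                simp only [List.getD_cons_zero] at hdt0
                simp [hdt0]
            · -- a number starts right after the separator
              have hdlt : 0 < (t.takeWhile PySem.Chars.isdigit).length := by
                rw [ht]
                simp only [List.takeWhile_cons]
                rw [ht] at hdt0
                simp only [List.getD_cons_zero] at hdt0
                simp [hdt0]
              unfold pvBStep
              rw [hda, hdt0]
              simp only [Bool.true_and, decide_eq_true_eq]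
              rw [if_pos hle]
              have hcn : ((d.length : Int) + 1).toNat = d.length + 1 + 0 := by omega
              rw [hcn, pvExpandL_shift d t c0 hc0, pvExpandR_shift d t c0, pvSlice_shift]
              have hsl : PySem.List.slice t (some ((pvExpandL t 0 : Nat) : Int))
                  (some (((pvExpandR t 0 : Nat) : Int) + 1)) = t.takeWhile PySem.Chars.isdigit := by
                have hl0 : pvExpandL t 0 = 0 := rfl
                rw [hl0, pvExpandR_run t 0 hdlt]
                exact pvSlice_prefix t hdlt
              rw [hsl, pvRef_neg_one, if_neg (List.ne_nil_of_length_pos hdlt)]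
              simp [pvVal]
        rcases Nat.eq_zero_or_pos d.length with hm0 | hmpos
        · have hdnil : d = [] := List.eq_nil_of_length_eq_zero hm0
          rw [pvBStep_miss_digit _ _ ((d.length : Int) - 1) (pvDigitAt_neg _ _ (by omega)),
              pvBStep_miss_digit _ _ (d.length : Int) hda0]
          rw [hcol3 [] (-1) (by omega), hstepR]
          rw [if_neg (by rintro ⟨h, _⟩; exact h hdnil)]
          simp
        · rw [pvBStep_hit_run0 (d ++ c0 :: t) [] (-1) ((d.length : Int) - 1) (by omega)
                (by rw [htake]; omega) (by omega)]
          simp only [List.nil_append]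
          rw [pvBStep_skip_run0 (d ++ c0 :: t) _ (d.length : Int) (by rw [htake]; exact hmpos)
                (by rw [htake])]
          rw [hcol3 _ _ (by rw [htake]; omega)]
          rw [hstepR, if_pos ⟨List.ne_nil_of_length_pos hmpos, by omega, by omega⟩]
          simp [htake]
      · -- the window lies beyond the separator: shift everything into t
        have hej : (d.length : Int) + 1 ≤ j := by omega
        have hmono1 : (-1 : Int) ≤ (([] : List Int), (-1 : Int)).2 := by norm_num
        have e1 := pvBStep_shift d t c0 hc0 ([], -1) hmono1 (j - 1) (by omega)
        norm_num at e1
        rw [e1]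
        have hmono2 := pvBStep_lastE_mono t ([], -1) (j - 1 - d.length - 1) hmono1
        rw [pvBStep_shift d t c0 hc0 _ hmono2 j (by omega)]
        have hmono3 := pvBStep_lastE_mono t _ (j - d.length - 1) hmono2
        rw [pvBStep_shift d t c0 hc0 _ hmono3 (j + 1) (by omega)]
        have harg1 : j - 1 - (d.length : Int) - 1 = j - d.length - 1 - 1 := by ring
        have harg3 : j + 1 - (d.length : Int) - 1 = j - d.length - 1 + 1 := by ring
        rw [harg1, harg3]
        have hIH := IH t.length htn t rfl (j - d.length - 1)
        simp only [List.foldl_cons, List.foldl_nil] at hIH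
        rw [hstepR, if_neg (show ¬(d ≠ [] ∧ -1 ≤ j ∧ j ≤ (d.length : Int)) from by
          rintro ⟨_, _, h⟩; omega)]
        simp only [List.nil_append]
        rw [← hIH]

theorem pvB_eq_ref : ∀ (L : List Char) (j : Int),
    (([j - 1, j, j + 1].foldl (pvBStep L) ([], -1)).1) = pvRef true L j :=
  fun L j => pvB_run L.length L rfl j

theorem pvRef_true_eq_aux : ∀ (n : Nat) (L : List Char), L.length = n → ∀ (j : Int),
    pvRef true L j = pvRef false L j ++
      (if 0 < (L.reverse.takeWhile PySem.Chars.isdigit).length ∧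
          (L.length : Int) - (L.reverse.takeWhile PySem.Chars.isdigit).length - 1 ≤ j ∧
          j ≤ (L.length : Int)
       then [pvVal ((L.reverse.takeWhile PySem.Chars.isdigit).reverse)] else []) := by
  intro n
  induction n using Nat.strong_induction_on with
  | _ n IH =>
    intro L hL j
    have hsplit := List.takeWhile_append_dropWhile (p := PySem.Chars.isdigit) (l := L)
    rcases hrest : L.dropWhile PySem.Chars.isdigit with _ | ⟨c0, t⟩
    · -- L is all digits
      have hdL : L.takeWhile PySem.Chars.isdigit = L := by
        conv_rhs => rw [← hsplit]
        rw [hrest]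
        simp
      have hall : ∀ x ∈ L, PySem.Chars.isdigit x = true := List.takeWhile_eq_self_iff.mp hdL
      have hrevL : L.reverse.takeWhile PySem.Chars.isdigit = L.reverse :=
        List.takeWhile_eq_self_iff.mpr (fun x hx => hall x (List.mem_reverse.mp hx))
      have hfalse : pvRef false L j = [] := by
        rw [pvRef]
        simp [hrest]
      have htrue : pvRef true L j =
          if L ≠ [] ∧ -1 ≤ j ∧ j ≤ (L.length : Int) then [pvVal L] else [] := by
        rw [pvRef]
        simp [hrest, hdL]
      rw [hfalse, htrue, List.nil_append, hrevL, List.length_reverse, List.reverse_reverse]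
      refine if_congr ?_ rfl rfl
      constructor
      · rintro ⟨h1, h2, h3⟩
        exact ⟨List.length_pos_of_ne_nil h1, by omega, h3⟩
      · rintro ⟨h1, h2, h3⟩
        exact ⟨List.ne_nil_of_length_pos h1, by omega, h3⟩
    · -- L = d ++ c0 :: t with c0 not a digit
      set d := L.takeWhile PySem.Chars.isdigit with hd
      have hc0 : PySem.Chars.isdigit c0 = false := by
        have hne : L.dropWhile PySem.Chars.isdigit ≠ [] := by rw [hrest]; simp
        have := List.head_dropWhile_not PySem.Chars.isdigit hne
        simpa [hrest] using this
      have hlen : L.length = d.length + 1 + t.length := by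
        have := congrArg List.length hsplit
        simp only [List.length_append, hrest, List.length_cons] at this
        omega
      have hLdc : L = d ++ c0 :: t := by rw [← hsplit, hrest]
      have hrev : L.reverse.takeWhile PySem.Chars.isdigit
          = t.reverse.takeWhile PySem.Chars.isdigit := by
        rw [hLdc]
        simp only [List.reverse_append, List.reverse_cons]
        rw [List.append_assoc, List.singleton_append]
        exact pvTakeWhile_append_false _ c0 hc0 t.reverse (c0 :: d.reverse).tail ▸
          pvTakeWhile_append_false _ c0 hc0 t.reverse d.reverse
      have hstep : ∀ keep : Bool, pvRef keep L j =
          (if d ≠ [] ∧ -1 ≤ j ∧ j ≤ (d.length : Int) then [pvVal d] else []) ++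
            pvRef keep t (j - d.length - 1) := by
        intro keep
        rw [pvRef]
        simp only [hrest, List.tail_cons]
        rw [dif_neg (List.cons_ne_nil c0 t)]
      rw [hstep true, hstep false]
      rw [IH t.length (by omega) t rfl (j - d.length - 1)]
      rw [List.append_assoc]
      congr 2
      rw [hrev]
      set k := (t.reverse.takeWhile PySem.Chars.isdigit).length with hk
      have hkt : k ≤ t.length := by
        have := List.IsPrefix.length_le (List.takeWhile_prefix (l := t.reverse) PySem.Chars.isdigit)
        simpa using this
      refine if_congr ?_ rfl rfl
      constructor
      · rintro ⟨h1, h2, h3⟩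
        exact ⟨h1, by omega, by omega⟩
      · rintro ⟨h1, h2, h3⟩
        exact ⟨h1, by omega, by omega⟩

theorem pvRef_true_eq : ∀ (L : List Char) (j : Int),
    pvRef true L j = pvRef false L j ++
      (if 0 < (L.reverse.takeWhile PySem.Chars.isdigit).length ∧
          (L.length : Int) - (L.reverse.takeWhile PySem.Chars.isdigit).length - 1 ≤ j ∧
          j ≤ (L.length : Int)
       then [pvVal ((L.reverse.takeWhile PySem.Chars.isdigit).reverse)] else []) :=
  fun L j => pvRef_true_eq_aux L.length L rfl j

-- ===== VERDICT (by name: the statement is the Claim_ definition above) =====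
theorem extract_numbers_around_index_spec : Claim_unchanged_extract_numbers_around_index := by
  intro line j _ hD
  show pvALoop j line.toList 0 [] [] false = _
  rw [pvA_eq_ref]
  show _ = ([j - 1, j, j + 1].foldl (pvBStep line.toList) ([], -1)).1
  rw [pvB_eq_ref, pvRef_true_eq]
  rw [if_neg (by exact hD), List.append_nil]

theorem extract_numbers_around_index_changed : Claim_changed_extract_numbers_around_index := by
  unfold Claim_changed_extract_numbers_around_index; decide

theorem extract_numbers_around_index_tight : Claim_exact_extract_numbers_around_index := by
  intro line j _ hD
  show pvALoop j line.toList 0 [] [] false ≠ ([j - 1, j, j + 1].foldl (pvBStep line.toList) ([], -1)).1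
  rw [pvA_eq_ref, pvB_eq_ref, pvRef_true_eq, if_pos (by exact hD)]
  intro h
  have := congrArg List.length h
  simp at this
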